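-- pv_equiv track=rewrite | github.com/tinazhouhui/telco_obeznik | app/models/output_prep.py | create_archive_menu
-- ===== SOURCE A (Python) =====
-- def create_archive_menu(all_links: dict) -> dict:
--     """
--     returns links per year for archive
--     """
--
--     archive_menu = {}
--
--     for key, value in all_links.items():
--         year = ''.join(list(filter(str.isdigit, value)))
--         if year not in archive_menu:
--             archive_menu[year] = {
--                 key: value
--             }
--         else:
--             archive_menu[year][key] = value
--
--     return archive_menu
-- ===== SOURCE B (Python) =====
-- def create_archive_menu(all_links: dict) -> dict:
--     """
--     returns links per year for archive
--     """
--     keyed = [(''.join(filter(str.isdigit, value)), key, value)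
--              for key, value in all_links.items()]
--     return {
--         year: {k: v for y, k, v in keyed if y == year}
--         for year in dict.fromkeys(y for y, _, _ in keyed)
--     }
-- ===== Notes on version B (the rewrite author's own statement) =====
-- stated objective: idiomatic
-- what changed: B computes each item's digit-key once into a keyed list, takes the distinct years via dict.fromkeys, and builds the result as one dict comprehension per distinct year, instead of A's incremental membership-test bucketing into nested dicts.
import Mathlib
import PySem

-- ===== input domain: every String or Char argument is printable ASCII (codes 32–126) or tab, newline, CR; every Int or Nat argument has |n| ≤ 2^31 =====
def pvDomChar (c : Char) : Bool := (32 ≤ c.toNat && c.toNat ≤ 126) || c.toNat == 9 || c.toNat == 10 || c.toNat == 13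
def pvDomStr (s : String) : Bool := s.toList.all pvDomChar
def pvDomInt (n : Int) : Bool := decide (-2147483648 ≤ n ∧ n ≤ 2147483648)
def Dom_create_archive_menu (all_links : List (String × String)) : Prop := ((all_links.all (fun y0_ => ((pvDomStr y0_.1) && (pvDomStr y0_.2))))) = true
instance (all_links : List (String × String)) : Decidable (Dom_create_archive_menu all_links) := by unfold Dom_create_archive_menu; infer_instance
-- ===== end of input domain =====

-- B groups by first computing each item's year key once, then building the result by one
-- comprehension per distinct year (dict.fromkeys for first-occurrence order), instead of
-- A's incremental membership-test bucketing; objective: idiomatic, not faster.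

-- ''.join(filter(str.isdigit, value)): on a single printable-ASCII char, str.isdigit is
-- exactly Char.isDigit ('0'..'9'); exact on the stated ASCII domain.
def pvYearOf (v : String) : String := String.ofList (v.toList.filter Char.isDigit)

-- ===== PORT A =====
def create_archive_menu (all_links : List (String × String)) : List (String × List (String × String)) :=
  let archive_menu : PySem.Dict String (PySem.Dict String String) :=
    all_links.foldl (fun archive_menu kv =>
      let year := pvYearOf kv.2
      if archive_menu.contains year then
        -- archive_menu[year][key] = value
        archive_menu.insert year ((archive_menu.getD year PySem.Dict.empty).insert kv.1 kv.2)
      else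
        -- archive_menu[year] = {key: value}
        archive_menu.insert year (PySem.Dict.empty.insert kv.1 kv.2))
      PySem.Dict.empty
  archive_menu.items.map (fun p => (p.1, p.2.items))

-- ===== PORT B =====
def create_archive_menu_alt (all_links : List (String × String)) : List (String × List (String × String)) :=
  let keyed : List (String × String × String) :=
    all_links.map (fun kv => (pvYearOf kv.2, kv.1, kv.2))
  let years : List String := PySem.List.dedup (keyed.map (·.1))
  years.map (fun year =>
    (year,
      -- inner dict comprehension {k: v for y, k, v in keyed if y == year}
      ((keyed.filter (fun t => t.1 == year)).foldl
        (fun d t => d.insert t.2.1 t.2.2) PySem.Dict.empty).items))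

-- ===== PRECONDITION & SPEC =====
def Spec_create_archive_menu (all_links : List (String × String)) (out : List (String × List (String × String))) : Prop := out = create_archive_menu_alt all_links
instance (all_links : List (String × String)) (out : List (String × List (String × String))) : Decidable (Spec_create_archive_menu all_links out) := by unfold Spec_create_archive_menu; infer_instance

-- ===== CLAIM (what is proved, stated in full; the proofs are below) =====
def Claim_equal_create_archive_menu : Prop := ∀ (all_links : List (String × String)), Dom_create_archive_menu all_links → Spec_create_archive_menu all_links (create_archive_menu all_links)

-- ===== LEMMAS AND PROOFS =====

-- A's loop body is exactly Dict.modify at the year key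
theorem pv_stepA_eq_modify (d : PySem.Dict String (PySem.Dict String String)) (kv : String × String) :
    (if d.contains (pvYearOf kv.2) then
       d.insert (pvYearOf kv.2) ((d.getD (pvYearOf kv.2) PySem.Dict.empty).insert kv.1 kv.2)
     else
       d.insert (pvYearOf kv.2) (PySem.Dict.empty.insert kv.1 kv.2))
    = d.modify (pvYearOf kv.2) PySem.Dict.empty (fun inner => inner.insert kv.1 kv.2) := by
  by_cases h : d.contains (pvYearOf kv.2)
  · simp [PySem.Dict.modify, h]
  · simp [PySem.Dict.modify, h, PySem.Dict.getD_of_not_contains]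

-- the inner dict accumulated by the modify-loop at key y is the insert-fold over the filtered list
theorem pv_getD_grouped (l : List (String × String)) (d : PySem.Dict String (PySem.Dict String String)) (y : String) :
    (l.foldl (fun d kv => d.modify (pvYearOf kv.2) PySem.Dict.empty (fun inner => inner.insert kv.1 kv.2)) d).getD y PySem.Dict.empty
    = (l.filter (fun kv => pvYearOf kv.2 == y)).foldl (fun inner kv => inner.insert kv.1 kv.2) (d.getD y PySem.Dict.empty) := by
  induction l generalizing d with
  | nil => rfl
  | cons kv l ih =>
    simp only [List.foldl_cons, List.filter_cons]
    by_cases h : pvYearOf kv.2 = y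
    · simp [h, ih]
    · simp [PySem.Dict.getD_modify, Ne.symm h, h, ih]

-- ===== VERDICT (by name: the statement is the Claim_ definition above) =====
theorem create_archive_menu_spec : Claim_equal_create_archive_menu := by
  intro l _
  show create_archive_menu l = create_archive_menu_alt l
  unfold create_archive_menu create_archive_menu_alt
  have hstep : (fun (d : PySem.Dict String (PySem.Dict String String)) (kv : String × String) =>
      let year := pvYearOf kv.2
      if d.contains year then
        d.insert year ((d.getD year PySem.Dict.empty).insert kv.1 kv.2)
      else
        d.insert year (PySem.Dict.empty.insert kv.1 kv.2))
      = (fun d kv => d.modify (pvYearOf kv.2) PySem.Dict.empty (fun inner => inner.insert kv.1 kv.2)) :=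
    funext fun d => funext fun kv => pv_stepA_eq_modify d kv
  simp only [hstep]
  set M := l.foldl (fun d kv => d.modify (pvYearOf kv.2) PySem.Dict.empty (fun inner => inner.insert kv.1 kv.2)) PySem.Dict.empty with hM
  have hnd : M.keys.Nodup := PySem.Dict.nodup_keys_foldl_modify_key _ _ _ _ _ PySem.Dict.nodup_keys_empty
  have hkeys : M.keys = PySem.List.dedup (l.map (fun kv => pvYearOf kv.2)) := by
    rw [hM, PySem.Dict.keys_foldl_modify_key]
    simp [PySem.Set.update_nil_left]
  rw [PySem.Dict.items_eq_map_keys M hnd PySem.Dict.empty, List.map_map, hkeys, List.map_map]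
  apply List.map_congr_left
  intro y _
  simp only [Function.comp]
  rw [hM, pv_getD_grouped, PySem.Dict.getD_empty, List.filter_map, List.foldl_map]
  rfl
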